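-- pv_equiv track=rewrite | github.com/jgwiese/mcmc_bnn_symmetry | src/utils/equioutput/cardinality.py | tanh_mlp_cardinalities
-- ===== SOURCE A (Python) =====
-- import math
--
-- def tanh_cardinality(hidden):
--     return 2**hidden
--
-- def permutation_cardinality(hidden):
--     return math.factorial(hidden)
--
-- def tanh_layer_cardinality(hidden):
--     return permutation_cardinality(hidden) * tanh_cardinality(hidden)
--
-- def tanh_mlp_cardinalities(hidden_layers_sizes):
--     permutation = 1
--     tanh = 1
--     total = 1
--     for layer_size in hidden_layers_sizes:
--         permutation *= permutation_cardinality(layer_size)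
--         tanh *= tanh_cardinality(layer_size)
--         total *= tanh_layer_cardinality(layer_size)
--     return permutation, tanh, total
-- ===== SOURCE B (Python) =====
-- import math
--
-- def _prod_tree(xs):
--     # balanced divide-and-conquer product of xs
--     if len(xs) <= 1:
--         return xs[0] if xs else 1
--     mid = len(xs) // 2
--     return _prod_tree(xs[:mid]) * _prod_tree(xs[mid:])
--
-- def tanh_mlp_cardinalities(hidden_layers_sizes):
--     sizes = list(hidden_layers_sizes)
--     permutation = _prod_tree([math.factorial(s) for s in sizes])
--     tanh = 2 ** sum(sizes)
--     return permutation, tanh, permutation * tanh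
-- ===== Notes on version B (the rewrite author's own statement) =====
-- stated objective: alternative
-- what changed: Replaces the single three-accumulator loop by a balanced divide-and-conquer product tree over the factorials, the closed form 2**sum(sizes) for the power product, and total derived algebraically as permutation*tanh.
import Mathlib
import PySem

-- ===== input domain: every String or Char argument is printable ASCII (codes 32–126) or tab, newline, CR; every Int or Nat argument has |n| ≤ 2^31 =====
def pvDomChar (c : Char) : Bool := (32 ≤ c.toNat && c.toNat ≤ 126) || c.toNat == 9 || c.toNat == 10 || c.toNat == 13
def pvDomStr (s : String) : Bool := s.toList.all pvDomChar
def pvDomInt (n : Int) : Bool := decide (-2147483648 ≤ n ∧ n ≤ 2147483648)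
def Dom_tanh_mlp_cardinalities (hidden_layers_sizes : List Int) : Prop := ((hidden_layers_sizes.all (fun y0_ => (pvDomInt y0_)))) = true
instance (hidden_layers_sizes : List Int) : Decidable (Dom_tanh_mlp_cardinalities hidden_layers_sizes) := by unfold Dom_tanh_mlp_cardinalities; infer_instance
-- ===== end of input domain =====

-- B replaces A's three-accumulator loop by a balanced divide-and-conquer product tree over
-- the factorials, the closed form 2**sum(sizes), and total = permutation * tanh (objective: alternative).


-- ===== PORT A =====
-- math.factorial(n), exact for n ≥ 0 (Pre_ excludes negatives, where Python raises ValueError)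
def pyFactorial (n : Int) : Int := (Nat.factorial n.toNat : Int)

-- 2**n, exact for n ≥ 0
def pyPow2 (n : Int) : Int := (2 : Int) ^ n.toNat

def tanh_cardinality (hidden : Int) : Int := pyPow2 hidden

def permutation_cardinality (hidden : Int) : Int := pyFactorial hidden

def tanh_layer_cardinality (hidden : Int) : Int :=
  permutation_cardinality hidden * tanh_cardinality hidden

def tanh_mlp_cardinalities (hidden_layers_sizes : List Int) : Int × Int × Int :=
  hidden_layers_sizes.foldl
    (fun st layer_size =>
      (st.1 * permutation_cardinality layer_size,
       st.2.1 * tanh_cardinality layer_size,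
       st.2.2 * tanh_layer_cardinality layer_size))
    (1, 1, 1)

-- ===== PORT B =====
-- _prod_tree: xs[:mid] / xs[mid:] with 0 ≤ mid ≤ len(xs) are exactly take/drop
def prodTree (xs : List Int) : Int :=
  if xs.length ≤ 1 then
    match xs with
    | [] => 1
    | x :: _ => x
  else
    let mid := xs.length / 2
    prodTree (xs.take mid) * prodTree (xs.drop mid)
termination_by xs.length
decreasing_by
  · simp [List.length_take]; omega
  · simp [List.length_drop]; omega

def tanh_mlp_cardinalities_alt (hidden_layers_sizes : List Int) : Int × Int × Int :=
  let sizes := hidden_layers_sizes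
  let permutation := prodTree (sizes.map pyFactorial)
  let tanh := pyPow2 sizes.sum
  (permutation, tanh, permutation * tanh)

-- ===== PRECONDITION & SPEC =====
-- Pre_ excludes negative layer sizes, on which Python A raises ValueError (math.factorial).
def Pre_tanh_mlp_cardinalities (hidden_layers_sizes : List Int) : Prop :=
  ∀ s ∈ hidden_layers_sizes, 0 ≤ s
instance (hidden_layers_sizes : List Int) : Decidable (Pre_tanh_mlp_cardinalities hidden_layers_sizes) := by unfold Pre_tanh_mlp_cardinalities; infer_instance

def pvWitness_tanh_mlp_cardinalities : List Int := [2, 3, 1]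

def Spec_tanh_mlp_cardinalities (hidden_layers_sizes : List Int) (out : Int × Int × Int) : Prop := out = tanh_mlp_cardinalities_alt hidden_layers_sizes
instance (hidden_layers_sizes : List Int) (out : Int × Int × Int) : Decidable (Spec_tanh_mlp_cardinalities hidden_layers_sizes out) := by unfold Spec_tanh_mlp_cardinalities; infer_instance

-- ===== CLAIM (what is proved, stated in full; the proofs are below) =====
def Claim_equal_tanh_mlp_cardinalities : Prop := ∀ (hidden_layers_sizes : List Int), Dom_tanh_mlp_cardinalities hidden_layers_sizes → Pre_tanh_mlp_cardinalities hidden_layers_sizes → Spec_tanh_mlp_cardinalities hidden_layers_sizes (tanh_mlp_cardinalities hidden_layers_sizes)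

-- ===== LEMMAS AND PROOFS =====
theorem prodTree_eq (xs : List Int) : prodTree xs = xs.prod := by
  induction hn : xs.length using Nat.strong_induction_on generalizing xs with
  | _ n ih =>
    unfold prodTree
    split
    · match xs with
      | [] => simp
      | [x] => simp
      | x :: y :: t => simp at *
    · rename_i hlen
      show prodTree (xs.take (xs.length / 2)) * prodTree (xs.drop (xs.length / 2)) = xs.prod
      rw [ih (xs.take (xs.length / 2)).length (by simp [List.length_take]; omega) _ rfl,
          ih (xs.drop (xs.length / 2)).length (by simp [List.length_drop]; omega) _ rfl,
          ← List.prod_append, List.take_append_drop]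

theorem loop_eq (l : List Int) (h : ∀ s ∈ l, 0 ≤ s) (p t tot : Int) :
    l.foldl
      (fun st layer_size =>
        (st.1 * permutation_cardinality layer_size,
         st.2.1 * tanh_cardinality layer_size,
         st.2.2 * tanh_layer_cardinality layer_size))
      (p, t, tot)
    = (p * (l.map pyFactorial).prod, t * pyPow2 l.sum,
       tot * ((l.map pyFactorial).prod * pyPow2 l.sum)) := by
  induction l generalizing p t tot with
  | nil => simp [pyPow2]
  | cons s l ih =>
    have hs : 0 ≤ s := h s (List.mem_cons_self ..)
    have hsum : 0 ≤ l.sum := List.sum_nonneg (fun x hx => h x (List.mem_cons_of_mem _ hx))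
    have hpow : pyPow2 (s + l.sum) = pyPow2 s * pyPow2 l.sum := by
      simp only [pyPow2]
      rw [Int.toNat_add hs hsum, pow_add]
    rw [List.foldl_cons, ih (fun x hx => h x (List.mem_cons_of_mem _ hx))]
    simp only [List.map_cons, List.prod_cons, List.sum_cons, hpow,
      tanh_layer_cardinality, permutation_cardinality, tanh_cardinality]
    refine Prod.ext ?_ (Prod.ext ?_ ?_) <;> simp <;> ring

-- ===== VERDICT (by name: the statement is the Claim_ definition above) =====
theorem tanh_mlp_cardinalities_spec : Claim_equal_tanh_mlp_cardinalities := by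
  intro l _ hpre
  unfold Spec_tanh_mlp_cardinalities tanh_mlp_cardinalities tanh_mlp_cardinalities_alt
  rw [loop_eq l hpre]
  simp only [prodTree_eq]
  simp
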